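-- pv_equiv track=rewrite | github.com/Rayudusivamani/shl-recommendation-engine | app/scraper.py | parse_test_type
-- ===== SOURCE A (Python) =====
-- def parse_test_type(text):
--     """Extract test type codes"""
--     if not text:
--         return ['G']  # General
--
--     text_lower = text.lower()
--     types = []
--
--     # Mapping of keywords to test type codes
--     type_mapping = {
--         'knowledge': 'K',
--         'skills': 'K',
--         'cognitive': 'K',
--         'ability': 'K',
--         'aptitude': 'K',
--         'technical': 'K',
--         'personality': 'P',
--         'behavioral': 'B',
--         'behaviour': 'B',
--         'simulation': 'S',
--         'exercise': 'E',
--         'situational': 'S'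
--     }
--
--     for keyword, code in type_mapping.items():
--         if keyword in text_lower:
--             if code not in types:
--                 types.append(code)
--
--     return types if types else ['G']
-- ===== SOURCE B (Python) =====
-- def parse_test_type(text):
--     """Extract test type codes"""
--     if not text:
--         return ['G']
--
--     text_lower = text.lower()
--
--     # keywords grouped by code, in code order K, P, B, S, E
--     grouped = {
--         'K': ['knowledge', 'skills', 'cognitive', 'ability', 'aptitude', 'technical'],
--         'P': ['personality'],
--         'B': ['behavioral', 'behaviour'],
--         'S': ['simulation', 'situational'],
--         'E': ['exercise'],
--     }
--
--     types = [code for code, kws in grouped.items()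
--              if any(kw in text_lower for kw in kws)]
--     return types if types else ['G']
-- ===== Notes on version B (the rewrite author's own statement) =====
-- stated objective: simpler
-- what changed: Inverts A's flat keyword->code scan with an in-loop membership dedup into a grouped code->keywords table traversed once per code with an any() keyword scan (no dedup needed); Pre_ excludes texts containing 'situational' and 'exercise' but not 'simulation', where A's dict-iteration order accidentally emits 'E' before 'S' while B's fixed code order emits 'S' first.
-- outside the precondition, e.g. on parse_test_type('exercise is situational'): A returns ['E', 'S'], B returns ['S', 'E']
import Mathlib
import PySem

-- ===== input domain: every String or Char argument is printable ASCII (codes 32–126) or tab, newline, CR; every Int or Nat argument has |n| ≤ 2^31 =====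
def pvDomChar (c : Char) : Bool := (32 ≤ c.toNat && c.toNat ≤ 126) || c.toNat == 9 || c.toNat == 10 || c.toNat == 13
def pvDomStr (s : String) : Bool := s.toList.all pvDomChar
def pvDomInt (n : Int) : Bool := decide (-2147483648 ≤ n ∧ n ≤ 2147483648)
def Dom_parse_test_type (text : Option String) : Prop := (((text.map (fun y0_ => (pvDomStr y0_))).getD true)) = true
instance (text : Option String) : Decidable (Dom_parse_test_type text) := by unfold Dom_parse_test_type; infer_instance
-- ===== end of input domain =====

-- B inverts A's flat keyword->code scan into a grouped code->keywords table traversed once per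
-- code with an any() scan, removing the dedup branch; objective: simpler (same cost).

-- ===== PORT A =====
-- the flat keyword -> code mapping, in A's dict insertion order
def pvTypeMapping : List (String × String) :=
  [("knowledge", "K"), ("skills", "K"), ("cognitive", "K"),
   ("ability", "K"), ("aptitude", "K"), ("technical", "K"),
   ("personality", "P"), ("behavioral", "B"), ("behaviour", "B"),
   ("simulation", "S"), ("exercise", "E"), ("situational", "S")]

def parse_test_type (text : Option String) : List String :=
  match text with
  | none => ["G"]
  | some t =>
    if t = "" then ["G"]  -- 'if not text'
    else
      let text_lower := PySem.Str.lower t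
      let types := pvTypeMapping.foldl
        (fun types kc =>
          if PySem.Str.isIn kc.1 text_lower then
            if types.contains kc.2 then types else types ++ [kc.2]
          else types) []
      if types = [] then ["G"] else types

-- ===== PORT B =====
-- the grouped code -> keywords table, in code order K, P, B, S, E
def pvGrouped : List (String × List String) :=
  [("K", ["knowledge", "skills", "cognitive", "ability", "aptitude", "technical"]),
   ("P", ["personality"]),
   ("B", ["behavioral", "behaviour"]),
   ("S", ["simulation", "situational"]),
   ("E", ["exercise"])]

def parse_test_type_alt (text : Option String) : List String :=
  match text with
  | none => ["G"]
  | some t =>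
    if t = "" then ["G"]  -- 'if not text'
    else
      let text_lower := PySem.Str.lower t
      let types := (pvGrouped.filter
        (fun ck => ck.2.any (fun kw => PySem.Str.isIn kw text_lower))).map Prod.fst
      if types = [] then ["G"] else types

-- ===== PRECONDITION & SPEC =====
-- Pre_ excludes texts containing 'situational' and 'exercise' but not 'simulation': there A's
-- dict-iteration order happens to put 'E' before 'S', while B's fixed code order puts 'S' first;
-- the output order on that corner is an accident of A's flat dict and both orders are defensible.
def Pre_parse_test_type (text : Option String) : Prop :=
  (text.elim true (fun t =>
    !(PySem.Str.isIn "situational" (PySem.Str.lower t) &&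
      !PySem.Str.isIn "simulation" (PySem.Str.lower t) &&
      PySem.Str.isIn "exercise" (PySem.Str.lower t)))) = true
instance (text : Option String) : Decidable (Pre_parse_test_type text) := by
  unfold Pre_parse_test_type; infer_instance

def pvWitness_parse_test_type : Option String := some "cognitive exercise"

def Spec_parse_test_type (text : Option String) (out : List String) : Prop := out = parse_test_type_alt text
instance (text : Option String) (out : List String) : Decidable (Spec_parse_test_type text out) := by unfold Spec_parse_test_type; infer_instance

-- ===== CLAIM (what is proved, stated in full; the proofs are below) =====
def Claim_equal_parse_test_type : Prop := ∀ (text : Option String), Dom_parse_test_type text → Pre_parse_test_type text → Spec_parse_test_type text (parse_test_type text)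

-- ===== LEMMAS AND PROOFS =====

-- foldl over a mapped list, with explicit arguments (proof-side helper)
theorem pv_foldl_map {A B C : Type} (g : A → B) (f : C → B → C) (l : List A) (init : C) :
    l.foldl (fun x y => f x (g y)) init = (l.map g).foldl f init := by
  induction l generalizing init with
  | nil => rfl
  | cons a l ih => simp only [List.foldl_cons, List.map_cons, ih]

-- ===== VERDICT (by name: the statement is the Claim_ definition above) =====
set_option maxHeartbeats 2000000 in
theorem parse_test_type_spec : Claim_equal_parse_test_type := by
  intro text _ hpre
  unfold Spec_parse_test_type
  cases text with
  | none => rfl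
  | some t =>
    unfold Pre_parse_test_type at hpre
    simp only [Option.elim] at hpre
    revert hpre
    simp only [parse_test_type, parse_test_type_alt]
    by_cases h : t = ""
    · simp [h]
    · simp only [h, if_false]
      -- rewrite A's fold over keyword/code pairs as a fold over (hit?, code) pairs
      have hA : pvTypeMapping.foldl
          (fun (types : List String) (kc : String × String) =>
            if PySem.Str.isIn kc.1 (PySem.Str.lower t) then
              if types.contains kc.2 then types else types ++ [kc.2]
            else types) []
          = (pvTypeMapping.map
              (fun kc : String × String => (PySem.Str.isIn kc.1 (PySem.Str.lower t), kc.2))).foldl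
            (fun (types : List String) (bc : Bool × String) =>
              if bc.1 then (if types.contains bc.2 then types else types ++ [bc.2]) else types)
            [] :=
        pv_foldl_map
          (fun kc : String × String => (PySem.Str.isIn kc.1 (PySem.Str.lower t), kc.2))
          (fun (types : List String) (bc : Bool × String) =>
            if bc.1 then (if types.contains bc.2 then types else types ++ [bc.2]) else types)
          pvTypeMapping []
      -- rewrite B's filter over code/keywords groups as a filter over (code, hit?) pairs
      have hB : ((pvGrouped.filter
            (fun ck => ck.2.any (fun kw => PySem.Str.isIn kw (PySem.Str.lower t)))).map Prod.fst)
          = (((pvGrouped.map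
              (fun ck : String × List String =>
                (ck.1, ck.2.any (fun kw => PySem.Str.isIn kw (PySem.Str.lower t))))).filter
              (fun cb : String × Bool => cb.2)).map Prod.fst) := by
        rw [List.filter_map, List.map_map]; rfl
      rw [hA, hB]
      simp only [pvTypeMapping, pvGrouped, List.map_cons, List.map_nil,
        List.any_cons, List.any_nil]
      -- both sides and the precondition are now functions of the 12 keyword-hit booleans:
      -- a finite check over Bool^12
      generalize PySem.Str.isIn "knowledge" (PySem.Str.lower t) = b1
      generalize PySem.Str.isIn "skills" (PySem.Str.lower t) = b2
      generalize PySem.Str.isIn "cognitive" (PySem.Str.lower t) = b3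
      generalize PySem.Str.isIn "ability" (PySem.Str.lower t) = b4
      generalize PySem.Str.isIn "aptitude" (PySem.Str.lower t) = b5
      generalize PySem.Str.isIn "technical" (PySem.Str.lower t) = b6
      generalize PySem.Str.isIn "personality" (PySem.Str.lower t) = b7
      generalize PySem.Str.isIn "behavioral" (PySem.Str.lower t) = b8
      generalize PySem.Str.isIn "behaviour" (PySem.Str.lower t) = b9
      generalize PySem.Str.isIn "simulation" (PySem.Str.lower t) = b10
      generalize PySem.Str.isIn "exercise" (PySem.Str.lower t) = b11
      generalize PySem.Str.isIn "situational" (PySem.Str.lower t) = b12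
      revert b1 b2 b3 b4 b5 b6 b7 b8 b9 b10 b11 b12
      decide
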